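-- pv_equiv track=rewrite | github.com/Loquaxious/COSC264 | Mid Term Revision/basicpacketcheck.py | basicpacketcheck
-- ===== SOURCE A (Python) =====
-- def basicpacketcheck (pkt):
--     if len(pkt) < 20:
--         return 1
--     if pkt[0] >> 4 != 4:
--         return 2
--
--     X = sum(pkt[i]*2**(i*8) for i in range(20))
--     while X > 0xFFFF:
--         X0 = X & 0xFFFF
--         X1 = X >> 16
--         X = X0 + X1
--     if X != 0xFFFF:
--         return 3
--
--     if pkt[2]*2**8 + pkt[3] != len(pkt):
--         return 4
--
--     return True
-- ===== SOURCE B (Python) =====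
-- def basicpacketcheck(pkt):
--     if len(pkt) < 20:
--         return 1
--     if pkt[0] >> 4 != 4:
--         return 2
--     x = 0
--     for b in reversed(pkt[:20]):        # Horner: same big integer, no powers
--         x = x * 256 + b
--     if x > 0xFFFF:
--         x = x % 0xFFFF or 0xFFFF        # closed form of the carry-fold loop
--     if x != 0xFFFF:
--         return 3
--     if pkt[2] * 256 + pkt[3] != len(pkt):
--         return 4
--     return True
-- ===== Notes on version B (the rewrite author's own statement) =====
-- stated objective: simpler
-- what changed: B builds the 20-byte big integer by Horner evaluation of the reversed header slice instead of summing byte*2**(8*i) powers, and replaces the while carry-fold loop by its closed form `x % 0xFFFF or 0xFFFF`.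
import Mathlib
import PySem

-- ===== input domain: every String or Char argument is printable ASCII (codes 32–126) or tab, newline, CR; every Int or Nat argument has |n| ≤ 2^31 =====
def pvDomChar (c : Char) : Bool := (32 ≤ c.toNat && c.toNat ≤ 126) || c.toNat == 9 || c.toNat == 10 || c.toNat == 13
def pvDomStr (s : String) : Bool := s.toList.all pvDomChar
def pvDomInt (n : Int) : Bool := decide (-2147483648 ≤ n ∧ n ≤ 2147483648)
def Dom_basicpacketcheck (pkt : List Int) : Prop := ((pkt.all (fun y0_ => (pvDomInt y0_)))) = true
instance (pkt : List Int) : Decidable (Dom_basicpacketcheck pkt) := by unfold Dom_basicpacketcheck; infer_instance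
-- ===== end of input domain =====

-- B replaces A's sum of byte·2^(8i) powers by a Horner evaluation of the same integer and
-- A's while carry-fold loop by its closed form (x % 0xFFFF or 0xFFFF); objective: simpler.

-- ===== PORT A =====
-- needed by the port's decreasing_by, so it stays above the claim block
lemma pv_band_shift (X : Int) (h0 : 0 ≤ X) :
    PySem.Int.band X 65535 = X % 65536 ∧ X >>> (16:Nat) = X / 65536 := by
  constructor
  · rw [PySem.Int.band_of_nonneg h0 (by norm_num)]
    have h2 : (65535:Int).toNat = 65535 := rfl
    have h3 := Nat.and_two_pow_sub_one_eq_mod X.toNat 16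
    norm_num at h3
    rw [h2, h3]; omega
  · rw [Int.shiftRight_eq_div_pow]; norm_num

-- the `while X > 0xFFFF` loop; Python's `X & 0xFFFF` is PySem.Int.band, `X >> 16` is `>>>` (both exact)
def pvFoldA (X : Int) : Int :=
  if 65535 < X then pvFoldA (PySem.Int.band X 65535 + X >>> (16:Nat)) else X
termination_by X.toNat
decreasing_by
  obtain ⟨hb, hs⟩ := pv_band_shift X (by omega)
  rw [hb, hs]; omega

-- Python returns True on success; under the Int convention True is 1
def basicpacketcheck (pkt : List Int) : Int :=
  if pkt.length < 20 then 1
  else if PySem.List.pyGetD pkt 0 0 >>> (4:Nat) ≠ 4 then 2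
  else
    let X := ((PySem.List.pyRange 0 20 1).map
      (fun i => PySem.List.pyGetD pkt i 0 * 2 ^ ((i*8).toNat))).sum
    let X' := pvFoldA X
    if X' ≠ 65535 then 3
    else if PySem.List.pyGetD pkt 2 0 * 2 ^ 8 + PySem.List.pyGetD pkt 3 0 ≠ (pkt.length : Int) then 4
    else 1

-- ===== PORT B =====
def basicpacketcheck_alt (pkt : List Int) : Int :=
  if pkt.length < 20 then 1
  else if PySem.List.pyGetD pkt 0 0 >>> (4:Nat) ≠ 4 then 2
  else
    let x := ((PySem.List.slice pkt none (some 20)).reverse.foldl (fun x b => x*256 + b) 0)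
    let x2 := if 65535 < x then (let r := PySem.Int.mod x 65535; if r = 0 then 65535 else r) else x
    if x2 ≠ 65535 then 3
    else if PySem.List.pyGetD pkt 2 0 * 256 + PySem.List.pyGetD pkt 3 0 ≠ (pkt.length : Int) then 4
    else 1

-- ===== PRECONDITION & SPEC =====
def Spec_basicpacketcheck (pkt : List Int) (out : Int) : Prop := out = basicpacketcheck_alt pkt
instance (pkt : List Int) (out : Int) : Decidable (Spec_basicpacketcheck pkt out) := by unfold Spec_basicpacketcheck; infer_instance

-- ===== CLAIM (what is proved, stated in full; the proofs are below) =====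
def Claim_equal_basicpacketcheck : Prop := ∀ (pkt : List Int), Dom_basicpacketcheck pkt → Spec_basicpacketcheck pkt (basicpacketcheck pkt)

-- ===== LEMMAS AND PROOFS =====

-- the carry-fold loop computes B's closed form, for every integer input
lemma pvFoldA_eq (X : Int) :
    pvFoldA X = if 65535 < X then (if X % 65535 = 0 then 65535 else X % 65535) else X := by
  induction X using pvFoldA.induct with
  | case1 X h ih =>
    obtain ⟨hb, hs⟩ := pv_band_shift X (by omega)
    rw [pvFoldA, if_pos h, ih, hb, hs]
    split_ifs <;> omega
  | case2 X h => rw [pvFoldA, if_neg h, if_neg h]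

-- A's weighted byte sum equals B's Horner evaluation of the first 20 bytes
lemma pv_sum_eq (a0 a1 a2 a3 a4 a5 a6 a7 a8 a9 a10 a11 a12 a13 a14 a15 a16 a17 a18 a19 : Int) (rest : List Int) :
    ((PySem.List.pyRange 0 20 1).map
      (fun i => PySem.List.pyGetD (a0::a1::a2::a3::a4::a5::a6::a7::a8::a9::a10::a11::a12::a13::a14::a15::a16::a17::a18::a19::rest) i 0 * 2 ^ ((i*8).toNat))).sum
    = ((PySem.List.slice (a0::a1::a2::a3::a4::a5::a6::a7::a8::a9::a10::a11::a12::a13::a14::a15::a16::a17::a18::a19::rest) none (some 20)).reverse.foldl (fun x b => x*256 + b) 0) := by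
  have hr : PySem.List.pyRange 0 20 1 = [0,1,2,3,4,5,6,7,8,9,10,11,12,13,14,15,16,17,18,19] := by decide
  have hsl : PySem.List.slice (a0::a1::a2::a3::a4::a5::a6::a7::a8::a9::a10::a11::a12::a13::a14::a15::a16::a17::a18::a19::rest) none (some 20) = (a0::a1::a2::a3::a4::a5::a6::a7::a8::a9::a10::a11::a12::a13::a14::a15::a16::a17::a18::a19::rest).take 20 := by
    rw [show (20:Int) = ((20:Nat):Int) from rfl, PySem.List.slice_to_natCast]
  rw [hr, hsl]
  simp only [List.map, List.sum_cons, List.sum_nil, PySem.List.pyGetD_ofNat',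
    List.take_succ_cons, List.take_zero, List.reverse_cons, List.reverse_nil,
    List.foldl, List.nil_append, List.cons_append]
  norm_num [show Int.toNat 0 = 0 from rfl, show Int.toNat 8 = 8 from rfl, show Int.toNat 16 = 16 from rfl, show Int.toNat 24 = 24 from rfl, show Int.toNat 32 = 32 from rfl, show Int.toNat 40 = 40 from rfl, show Int.toNat 48 = 48 from rfl, show Int.toNat 56 = 56 from rfl, show Int.toNat 64 = 64 from rfl, show Int.toNat 72 = 72 from rfl, show Int.toNat 80 = 80 from rfl, show Int.toNat 88 = 88 from rfl, show Int.toNat 96 = 96 from rfl, show Int.toNat 104 = 104 from rfl, show Int.toNat 112 = 112 from rfl, show Int.toNat 120 = 120 from rfl, show Int.toNat 128 = 128 from rfl, show Int.toNat 136 = 136 from rfl, show Int.toNat 144 = 144 from rfl, show Int.toNat 152 = 152 from rfl]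
  ring

lemma pv_long_case (a0 a1 a2 a3 a4 a5 a6 a7 a8 a9 a10 a11 a12 a13 a14 a15 a16 a17 a18 a19 : Int) (rest : List Int) :
    basicpacketcheck (a0::a1::a2::a3::a4::a5::a6::a7::a8::a9::a10::a11::a12::a13::a14::a15::a16::a17::a18::a19::rest) = basicpacketcheck_alt (a0::a1::a2::a3::a4::a5::a6::a7::a8::a9::a10::a11::a12::a13::a14::a15::a16::a17::a18::a19::rest) := by
  have hlen : ¬ ((a0::a1::a2::a3::a4::a5::a6::a7::a8::a9::a10::a11::a12::a13::a14::a15::a16::a17::a18::a19::rest).length < 20) := by simp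
  simp only [basicpacketcheck, basicpacketcheck_alt]
  rw [if_neg hlen, if_neg hlen]
  by_cases h0 : PySem.List.pyGetD (a0::a1::a2::a3::a4::a5::a6::a7::a8::a9::a10::a11::a12::a13::a14::a15::a16::a17::a18::a19::rest) 0 0 >>> (4:Nat) ≠ 4
  · rw [if_pos h0, if_pos h0]
  · rw [if_neg h0, if_neg h0]
    rw [pv_sum_eq, pvFoldA_eq, PySem.Int.mod_eq_emod_of_pos (by norm_num : (0:Int) < 65535)]
    norm_num

-- ===== VERDICT (by name: the statement is the Claim_ definition above) =====
theorem basicpacketcheck_spec : Claim_equal_basicpacketcheck := by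
  intro pkt _
  unfold Spec_basicpacketcheck
  rcases pkt with _ | ⟨a0, _ | ⟨a1, _ | ⟨a2, _ | ⟨a3, _ | ⟨a4, _ | ⟨a5, _ | ⟨a6, _ | ⟨a7, _ | ⟨a8, _ | ⟨a9, _ | ⟨a10, _ | ⟨a11, _ | ⟨a12, _ | ⟨a13, _ | ⟨a14, _ | ⟨a15, _ | ⟨a16, _ | ⟨a17, _ | ⟨a18, _ | ⟨a19, rest⟩⟩⟩⟩⟩⟩⟩⟩⟩⟩⟩⟩⟩⟩⟩⟩⟩⟩⟩⟩
  all_goals first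
    | exact pv_long_case a0 a1 a2 a3 a4 a5 a6 a7 a8 a9 a10 a11 a12 a13 a14 a15 a16 a17 a18 a19 rest
    | (simp only [basicpacketcheck, basicpacketcheck_alt]; norm_num)
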